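-- pv_equiv track=rewrite | github.com/jagritx/Stringers | stringers/compress/tunstall.py | tunstall_decode
-- ===== SOURCE A (Python) =====
-- def tunstall_decode(encoded, codebook):
--     # Invert the codebook to map codes to characters
--     inverse_codebook = {code: char for char, code in codebook.items()}
--
--     # Decode the encoded string using the inverse codebook
--     decoded = ''
--     code = ''
--     for bit in encoded:
--         code += bit
--         if code in inverse_codebook:
--             decoded += inverse_codebook[code]
--             code = ''
--
--     return decoded
-- ===== SOURCE B (Python) =====
-- def tunstall_decode(encoded, codebook):
--     # Build a flat prefix trie: transitions (node, bit) -> node, terminals node -> char.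
--     trans = {}
--     term = {}
--     nxt = 1
--     for char, code in codebook.items():
--         cur = 0
--         for bit in code:
--             key = (cur, bit)
--             if key not in trans:
--                 trans[key] = nxt
--                 nxt += 1
--             cur = trans[key]
--         term[cur] = char
--
--     # Walk the trie over the encoded bits, emitting at terminal nodes.
--     out = []
--     cur = 0
--     for bit in encoded:
--         node = trans.get((cur, bit))
--         if node is None:
--             break
--         cur = node
--         if cur in term:
--             out.append(term[cur])
--             cur = 0
--     return ''.join(out)
-- ===== Notes on version B (the rewrite author's own statement) =====
-- stated objective: alternative
-- what changed: B precomputes a flat prefix trie (transition table (node,bit)->node plus terminal-node map) from the codebook and decodes by walking trie links node by node, instead of A's per-bit string-buffer growth and hash lookups of ever longer code strings; B also stops as soon as the bits leave the trie.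
import Mathlib
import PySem

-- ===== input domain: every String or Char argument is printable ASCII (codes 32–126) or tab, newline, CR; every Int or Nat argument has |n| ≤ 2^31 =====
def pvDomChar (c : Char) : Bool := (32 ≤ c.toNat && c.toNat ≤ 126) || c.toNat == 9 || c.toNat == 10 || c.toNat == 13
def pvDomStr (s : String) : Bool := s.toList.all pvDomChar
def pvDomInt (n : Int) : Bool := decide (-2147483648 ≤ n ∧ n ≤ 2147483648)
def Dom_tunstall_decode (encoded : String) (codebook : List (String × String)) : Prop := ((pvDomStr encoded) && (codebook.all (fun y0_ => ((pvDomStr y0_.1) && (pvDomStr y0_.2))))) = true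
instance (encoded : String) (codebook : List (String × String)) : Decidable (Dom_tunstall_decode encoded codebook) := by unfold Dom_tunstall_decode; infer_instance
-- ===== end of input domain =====

-- B replaces A's growing string buffer + dict membership with a precomputed flat prefix trie
-- walked node by node (objective: alternative data structure / algorithm; same decoded string).

-- the items of the Python dict `codebook` (the argument is a dict; both versions iterate codebook.items())
def pvItems (codebook : List (String × String)) : List (String × String) :=
  (PySem.Dict.ofList codebook).items

-- ===== PORT A =====
def tunstall_decode (encoded : String) (codebook : List (String × String)) : String :=
  let inverse : PySem.Dict String String :=
    (pvItems codebook).foldl (fun d p => d.insert p.2 p.1) PySem.Dict.empty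
  let r := encoded.toList.foldl (fun (st : String × String) bit =>
      let code := st.2.push bit
      match inverse.get? code with
      | some ch => (st.1 ++ ch, "")
      | none => (st.1, code)) ("", "")
  r.1

-- ===== PORT B =====
-- one step of the inner `for bit in code` loop of Source B (state: trans, nxt, cur)
def pvStep (st : PySem.Dict (Int × Char) Int × Int × Int) (bit : Char) :
    PySem.Dict (Int × Char) Int × Int × Int :=
  match st.1.get? (st.2.2, bit) with
  | some n => (st.1, st.2.1, n)
  | none => (st.1.insert (st.2.2, bit) st.2.1, st.2.1 + 1, st.2.1)

-- the build loop of Source B: transitions, terminals, next fresh node id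
def pvBuild (items : List (String × String)) :
    PySem.Dict (Int × Char) Int × PySem.Dict Int String × Int :=
  items.foldl (fun st p =>
      let r := p.2.toList.foldl pvStep (st.1, st.2.2, 0)
      (r.1, st.2.1.insert r.2.2 p.1, r.2.1))
    (PySem.Dict.empty, PySem.Dict.empty, 1)

-- the decode loop of Source B (the `break` becomes returning the accumulated output)
def pvDec (trans : PySem.Dict (Int × Char) Int) (term : PySem.Dict Int String) :
    List Char → Int → List String
  | [], _ => []
  | b :: rest, cur =>
    match trans.get? (cur, b) with
    | none => []
    | some n =>
      match term.get? n with
      | some ch => ch :: pvDec trans term rest 0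
      | none => pvDec trans term rest n

def tunstall_decode_alt (encoded : String) (codebook : List (String × String)) : String :=
  let r := pvBuild (pvItems codebook)
  String.join (pvDec r.1 r.2.1 encoded.toList 0)

-- ===== PRECONDITION & SPEC =====
def Spec_tunstall_decode (encoded : String) (codebook : List (String × String)) (out : String) : Prop := out = tunstall_decode_alt encoded codebook
instance (encoded : String) (codebook : List (String × String)) (out : String) : Decidable (Spec_tunstall_decode encoded codebook out) := by unfold Spec_tunstall_decode; infer_instance

-- ===== CLAIM (what is proved, stated in full; the proofs are below) =====
def Claim_equal_tunstall_decode : Prop := ∀ (encoded : String) (codebook : List (String × String)), Dom_tunstall_decode encoded codebook → Spec_tunstall_decode encoded codebook (tunstall_decode encoded codebook)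

-- ===== LEMMAS AND PROOFS =====

-- walking the trie from node v along a list of characters
def pvWalk (trans : PySem.Dict (Int × Char) Int) : Int → List Char → Option Int
  | cur, [] => some cur
  | cur, b :: s =>
    match trans.get? (cur, b) with
    | some n => pvWalk trans n s
    | none => none

-- structural invariant of the trie under construction
def pvInv (trans : PySem.Dict (Int × Char) Int) (nxt : Int) : Prop :=
  1 ≤ nxt ∧
  (∀ p b n, trans.get? (p, b) = some n →
      (1 ≤ n ∧ n < nxt) ∧ (p = 0 ∨ (1 ≤ p ∧ p < nxt))) ∧
  (∀ p b p' b' n, trans.get? (p, b) = some n → trans.get? (p', b') = some n →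
      p = p' ∧ b = b')

-- full relation between B's trie state and A's inverse dictionary
def pvM (trans : PySem.Dict (Int × Char) Int) (term : PySem.Dict Int String)
    (nxt : Int) (inv : PySem.Dict String String) : Prop :=
  pvInv trans nxt ∧
  (∀ n s, term.get? n = some s → n < nxt) ∧
  (∀ s : List Char, s ≠ [] →
    match pvWalk trans 0 s with
    | some n => term.get? n = inv.get? (String.ofList s)
    | none => inv.get? (String.ofList s) = none)

theorem pvWalk_append (trans : PySem.Dict (Int × Char) Int) (v : Int) (s u : List Char) :
    pvWalk trans v (s ++ u) = (pvWalk trans v s).bind (fun n => pvWalk trans n u) := by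
  induction s generalizing v with
  | nil => simp [pvWalk]
  | cons b s ih =>
    simp only [List.cons_append, pvWalk]
    cases trans.get? (v, b) with
    | none => simp
    | some n => simpa using ih n

theorem pvWalk_mono (trans trans' : PySem.Dict (Int × Char) Int)
    (hsub : ∀ k n, trans.get? k = some n → trans'.get? k = some n)
    (v : Int) (s : List Char) (m : Int) (h : pvWalk trans v s = some m) :
    pvWalk trans' v s = some m := by
  induction s generalizing v with
  | nil => simpa [pvWalk] using h
  | cons b s ih =>
    simp only [pvWalk] at h ⊢
    cases hg : trans.get? (v, b) with
    | none => rw [hg] at h; simp at h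
    | some n =>
      rw [hg] at h
      rw [hsub _ _ hg]
      exact ih n h

theorem pvWalk_node_range (trans : PySem.Dict (Int × Char) Int) (nxt : Int)
    (hI : pvInv trans nxt) (s : List Char) (cur : Int)
    (h : pvWalk trans 0 s = some cur) : cur = 0 ∨ (1 ≤ cur ∧ cur < nxt) := by
  induction s using List.reverseRecOn with
  | nil => left; simpa [pvWalk] using h.symm
  | append_singleton u b _ =>
    rw [pvWalk_append] at h
    cases hu : pvWalk trans 0 u with
    | none => rw [hu] at h; simp at h
    | some p =>
      rw [hu] at h
      simp only [Option.bind_some, pvWalk] at h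
      cases hg : trans.get? (p, b) with
      | none => rw [hg] at h; simp at h
      | some n =>
        rw [hg] at h
        obtain ⟨⟨h1, h2⟩, _⟩ := hI.2.1 _ _ _ hg
        right
        have : n = cur := Option.some.inj h
        omega

theorem pvWalk_inj (trans : PySem.Dict (Int × Char) Int) (nxt : Int)
    (hI : pvInv trans nxt) (s s' : List Char) (n : Int)
    (h : pvWalk trans 0 s = some n) (h' : pvWalk trans 0 s' = some n) : s = s' := by
  induction s using List.reverseRecOn generalizing s' n with
  | nil =>
    simp only [pvWalk] at h
    obtain rfl : (0 : Int) = n := Option.some.inj h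
    rcases List.eq_nil_or_concat s' with rfl | ⟨u', b', rfl⟩
    · rfl
    · exfalso
      rw [List.concat_eq_append] at h'
      rw [pvWalk_append] at h'
      cases hu' : pvWalk trans 0 u' with
      | none => rw [hu'] at h'; simp at h'
      | some p' =>
        rw [hu'] at h'
        simp only [Option.bind_some, pvWalk] at h'
        cases hg' : trans.get? (p', b') with
        | none => rw [hg'] at h'; simp at h'
        | some m =>
          rw [hg'] at h'
          simp only [pvWalk] at h'
          obtain rfl : m = 0 := Option.some.inj h'
          have := (hI.2.1 _ _ _ hg').1.1
          omega
  | append_singleton u b ih =>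
    rcases List.eq_nil_or_concat s' with rfl | ⟨u', b', rfl⟩
    · exfalso
      simp only [pvWalk] at h'
      obtain rfl : (0 : Int) = n := Option.some.inj h'
      rw [pvWalk_append] at h
      cases hu : pvWalk trans 0 u with
      | none => rw [hu] at h; simp at h
      | some p =>
        rw [hu] at h
        simp only [Option.bind_some, pvWalk] at h
        cases hg : trans.get? (p, b) with
        | none => rw [hg] at h; simp at h
        | some m =>
          rw [hg] at h
          simp only [pvWalk] at h
          obtain rfl : m = 0 := Option.some.inj h
          have := (hI.2.1 _ _ _ hg).1.1
          omega
    · rw [List.concat_eq_append] at h' ⊢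
      rw [pvWalk_append] at h h'
      cases hu : pvWalk trans 0 u with
      | none => rw [hu] at h; simp at h
      | some p =>
        cases hu' : pvWalk trans 0 u' with
        | none => rw [hu'] at h'; simp at h'
        | some p' =>
          rw [hu] at h; rw [hu'] at h'
          simp only [Option.bind_some, pvWalk] at h h'
          cases hg : trans.get? (p, b) with
          | none => rw [hg] at h; simp at h
          | some m =>
            cases hg' : trans.get? (p', b') with
            | none => rw [hg'] at h'; simp at h'
            | some m' =>
              rw [hg] at h; rw [hg'] at h'
              simp only [pvWalk] at h h'
              rw [Option.some.inj h] at hg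
              rw [Option.some.inj h'] at hg'
              obtain ⟨rfl, rfl⟩ := hI.2.2 _ _ _ _ _ hg hg'
              rw [ih u' p hu hu']

theorem pvWalk_insert_fresh (trans : PySem.Dict (Int × Char) Int) (nxt cur : Int) (b : Char)
    (hI : pvInv trans nxt) (_hnone : trans.get? (cur, b) = none)
    (hcur : cur = 0 ∨ (1 ≤ cur ∧ cur < nxt)) :
    ∀ (s : List Char) (v m : Int), (v = 0 ∨ (1 ≤ v ∧ v < nxt)) →
      pvWalk (trans.insert (cur, b) nxt) v s = some m →
      pvWalk trans v s = some m ∨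
        (∃ u, s = u ++ [b] ∧ pvWalk trans v u = some cur ∧ m = nxt) := by
  intro s
  induction s with
  | nil =>
    intro v m _ h
    left; exact h
  | cons c u ih =>
    intro v m hv h
    simp only [pvWalk] at h
    by_cases hk : ((v, c) : Int × Char) = (cur, b)
    · rw [PySem.Dict.get?_insert, if_pos hk] at h
      rw [Prod.mk.injEq] at hk
      cases u with
      | nil =>
        simp only [pvWalk] at h
        right
        refine ⟨[], by simp [hk.2], ?_, (Option.some.inj h).symm⟩
        simp [pvWalk, hk.1]
      | cons c' u' =>
        exfalso
        simp only [pvWalk] at h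
        by_cases hk' : ((nxt, c') : Int × Char) = (cur, b)
        · have hnc : nxt = cur := congrArg Prod.fst hk'
          have h1n : (1 : Int) ≤ nxt := hI.1
          rcases hcur with h0 | ⟨h1, h2⟩ <;> omega
        · rw [PySem.Dict.get?_insert, if_neg hk'] at h
          cases hg' : trans.get? (nxt, c') with
          | none => rw [hg'] at h; simp at h
          | some n' =>
            rw [hg'] at h
            have h1n : (1 : Int) ≤ nxt := hI.1
            rcases (hI.2.1 _ _ _ hg').2 with h0 | ⟨h1, h2⟩ <;> omega
    · rw [PySem.Dict.get?_insert, if_neg hk] at h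
      cases hg : trans.get? (v, c) with
      | none => rw [hg] at h; simp at h
      | some n =>
        rw [hg] at h
        have hn := (hI.2.1 _ _ _ hg).1
        rcases ih n m (Or.inr hn) h with hl | ⟨u₀, rfl, hw₀, rfl⟩
        · left
          simp only [pvWalk, hg]
          exact hl
        · right
          refine ⟨c :: u₀, rfl, ?_, rfl⟩
          simp only [pvWalk, hg]
          exact hw₀

theorem pvExtend (code : List Char) :
    ∀ (trans : PySem.Dict (Int × Char) Int) (nxt : Int) (pfx : List Char) (cur : Int),
    pvInv trans nxt → pvWalk trans 0 pfx = some cur →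
    pvInv (code.foldl pvStep (trans, nxt, cur)).1 (code.foldl pvStep (trans, nxt, cur)).2.1 ∧
    nxt ≤ (code.foldl pvStep (trans, nxt, cur)).2.1 ∧
    (∀ k n, trans.get? k = some n → (code.foldl pvStep (trans, nxt, cur)).1.get? k = some n) ∧
    pvWalk (code.foldl pvStep (trans, nxt, cur)).1 0 (pfx ++ code) = some (code.foldl pvStep (trans, nxt, cur)).2.2 ∧
    (∀ s m, pvWalk (code.foldl pvStep (trans, nxt, cur)).1 0 s = some m →
      pvWalk trans 0 s = some m ∨ (s <+: (pfx ++ code) ∧ nxt ≤ m)) := by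
  induction code with
  | nil =>
    intro trans nxt pfx cur hI hw
    simp only [List.foldl_nil, List.append_nil]
    exact ⟨hI, le_refl _, fun k n h => h, hw, fun s m h => Or.inl h⟩
  | cons b code' ih =>
    intro trans nxt pfx cur hI hw
    simp only [List.foldl_cons]
    cases hg : trans.get? (cur, b) with
    | some n =>
      have hstep : pvStep (trans, nxt, cur) b = (trans, nxt, n) := by
        simp [pvStep, hg]
      rw [hstep]
      have hw1 : pvWalk trans 0 (pfx ++ [b]) = some n := by
        rw [pvWalk_append, hw]
        simp [pvWalk, hg]
      obtain ⟨c1, c2, c3, c4, c5⟩ := ih trans nxt (pfx ++ [b]) n hI hw1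
      have hassoc : (pfx ++ [b]) ++ code' = pfx ++ (b :: code') := by simp
      rw [hassoc] at c4 c5
      exact ⟨c1, c2, c3, c4, c5⟩
    | none =>
      have hstep : pvStep (trans, nxt, cur) b =
          (trans.insert (cur, b) nxt, nxt + 1, nxt) := by
        simp [pvStep, hg]
      rw [hstep]
      have hcurr := pvWalk_node_range trans nxt hI pfx cur hw
      have h1n : (1 : Int) ≤ nxt := hI.1
      have hpres : ∀ k n, trans.get? k = some n →
          (trans.insert (cur, b) nxt).get? k = some n := by
        intro k n h
        have hk : k ≠ (cur, b) := by
          intro he; rw [he, hg] at h; simp at h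
        rw [PySem.Dict.get?_insert, if_neg hk]; exact h
      have hInv1 : pvInv (trans.insert (cur, b) nxt) (nxt + 1) := by
        refine ⟨by omega, ?_, ?_⟩
        · intro p c n h
          rw [PySem.Dict.get?_insert] at h
          by_cases hk : ((p, c) : Int × Char) = (cur, b)
          · rw [if_pos hk] at h
            have hn : n = nxt := (Option.some.inj h).symm
            rw [Prod.mk.injEq] at hk
            constructor
            · omega
            · rw [hk.1]; rcases hcurr with h0 | ⟨ha, hb⟩
              · exact Or.inl h0
              · exact Or.inr ⟨ha, by omega⟩
          · rw [if_neg hk] at h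
            obtain ⟨⟨ha, hb⟩, hc⟩ := hI.2.1 _ _ _ h
            exact ⟨⟨ha, by omega⟩, by rcases hc with h0 | ⟨hd, he⟩ <;> [exact Or.inl h0; exact Or.inr ⟨hd, by omega⟩]⟩
        · intro p c p' c' n h h'
          rw [PySem.Dict.get?_insert] at h h'
          by_cases hk : ((p, c) : Int × Char) = (cur, b) <;>
            by_cases hk' : ((p', c') : Int × Char) = (cur, b)
          · rw [if_pos hk] at h; rw [if_pos hk'] at h'
            rw [Prod.mk.injEq] at hk hk'
            exact ⟨hk.1.trans hk'.1.symm, hk.2.trans hk'.2.symm⟩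
          · rw [if_pos hk] at h; rw [if_neg hk'] at h'
            have hn : n = nxt := (Option.some.inj h).symm
            have := (hI.2.1 _ _ _ h').1.2
            omega
          · rw [if_neg hk] at h; rw [if_pos hk'] at h'
            have hn : n = nxt := (Option.some.inj h').symm
            have := (hI.2.1 _ _ _ h).1.2
            omega
          · rw [if_neg hk] at h; rw [if_neg hk'] at h'
            exact hI.2.2 _ _ _ _ _ h h'
      have hw1 : pvWalk (trans.insert (cur, b) nxt) 0 (pfx ++ [b]) = some nxt := by
        rw [pvWalk_append]
        rw [pvWalk_mono trans (trans.insert (cur, b) nxt) hpres 0 pfx cur hw]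
        simp [pvWalk, PySem.Dict.get?_insert]
      obtain ⟨c1, c2, c3, c4, c5⟩ := ih (trans.insert (cur, b) nxt) (nxt + 1) (pfx ++ [b]) nxt hInv1 hw1
      have hassoc : (pfx ++ [b]) ++ code' = pfx ++ (b :: code') := by simp
      rw [hassoc] at c4 c5
      refine ⟨c1, by omega, ?_, c4, ?_⟩
      · intro k n h
        exact c3 k n (hpres k n h)
      · intro s m hfin
        rcases c5 s m hfin with h1 | ⟨hpref, hm⟩
        · rcases pvWalk_insert_fresh trans nxt cur b hI hg hcurr s 0 m (Or.inl rfl) h1 with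
            h2 | ⟨u, rfl, hu, hm2⟩
          · exact Or.inl h2
          · have hupfx : u = pfx := pvWalk_inj trans nxt hI u pfx cur hu hw
            right
            refine ⟨?_, by omega⟩
            rw [hupfx]
            exact ⟨code', by simp⟩
        · exact Or.inr ⟨hpref, by omega⟩

theorem pvBuild_step (trans : PySem.Dict (Int × Char) Int) (term : PySem.Dict Int String)
    (nxt : Int) (inv : PySem.Dict String String) (hM : pvM trans term nxt inv)
    (char code : String) :
    pvM (code.toList.foldl pvStep (trans, nxt, 0)).1
      (term.insert (code.toList.foldl pvStep (trans, nxt, 0)).2.2 char)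
      (code.toList.foldl pvStep (trans, nxt, 0)).2.1
      (inv.insert code char) := by
  obtain ⟨hI, hTK, hMain⟩ := hM
  have hw0 : pvWalk trans 0 [] = some 0 := rfl
  obtain ⟨c1, c2, c3, c4, c5⟩ := pvExtend code.toList trans nxt [] 0 hI hw0
  simp only [List.nil_append] at c4 c5
  have h1n : (1 : Int) ≤ nxt := hI.1
  have h1n' : (1 : Int) ≤ (code.toList.foldl pvStep (trans, nxt, 0)).2.1 := c1.1
  have hcu' := pvWalk_node_range _ _ c1 code.toList _ c4
  have hkey : ∀ s : List Char, String.ofList s = code ↔ s = code.toList := by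
    intro s
    rw [← String.toList_inj]
    simp
  refine ⟨c1, ?_, ?_⟩
  · intro n s h
    rw [PySem.Dict.get?_insert] at h
    by_cases hn : n = (code.toList.foldl pvStep (trans, nxt, 0)).2.2
    · rcases hcu' with h0 | ⟨ha, hb⟩ <;> omega
    · rw [if_neg hn] at h
      have := hTK n s h
      omega
  · intro s hs
    cases hw' : pvWalk (code.toList.foldl pvStep (trans, nxt, 0)).1 0 s with
    | some n =>
      show (term.insert (code.toList.foldl pvStep (trans, nxt, 0)).2.2 char).get? n =
        (inv.insert code char).get? (String.ofList s)
      by_cases hn : n = (code.toList.foldl pvStep (trans, nxt, 0)).2.2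
      · have hscode : s = code.toList := by
          apply pvWalk_inj _ _ c1 s code.toList _ _ c4
          rw [hw', hn]
        rw [PySem.Dict.get?_insert, if_pos hn,
          PySem.Dict.get?_insert, if_pos ((hkey s).mpr hscode)]
      · have hsne : s ≠ code.toList := by
          intro he
          rw [he, c4] at hw'
          exact hn (Option.some.inj hw').symm
        rw [PySem.Dict.get?_insert, if_neg hn, PySem.Dict.get?_insert,
          if_neg (fun he => hsne ((hkey s).mp he))]
        rcases c5 s n hw' with hws | ⟨hpref, hge⟩
        · have hold : term.get? n = inv.get? (String.ofList s) := by
            have h0 := hMain s hs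
            rw [hws] at h0
            exact h0
          exact hold
        · have hterm : term.get? n = none := by
            cases ht : term.get? n with
            | none => rfl
            | some w => have := hTK n w ht; omega
          have hwsnone : pvWalk trans 0 s = none := by
            cases hws : pvWalk trans 0 s with
            | none => rfl
            | some m =>
              exfalso
              have hsame : m = n := by
                have := pvWalk_mono trans _ c3 0 s m hws
                rw [hw'] at this
                exact (Option.some.inj this).symm
              rcases pvWalk_node_range trans nxt hI s m hws with h0 | ⟨ha, hb⟩ <;> omega
          have hinv : inv.get? (String.ofList s) = none := by
            have h0 := hMain s hs
            rw [hwsnone] at h0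
            exact h0
          rw [hterm, hinv]
    | none =>
      show (inv.insert code char).get? (String.ofList s) = none
      have hwsnone : pvWalk trans 0 s = none := by
        cases hws : pvWalk trans 0 s with
        | none => rfl
        | some m =>
          exfalso
          have := pvWalk_mono trans _ c3 0 s m hws
          rw [hw'] at this
          simp at this
      have hsne : s ≠ code.toList := by
        intro he
        rw [he, c4] at hw'
        simp at hw'
      rw [PySem.Dict.get?_insert, if_neg (fun he => hsne ((hkey s).mp he))]
      have h0 := hMain s hs
      rw [hwsnone] at h0
      exact h0

theorem pvBuild_fold (items : List (String × String)) :
    ∀ (tr : PySem.Dict (Int × Char) Int) (tm : PySem.Dict Int String)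
      (nx : Int) (iv : PySem.Dict String String), pvM tr tm nx iv →
    pvM (items.foldl (fun st p =>
          let r := p.2.toList.foldl pvStep (st.1, st.2.2, 0)
          (r.1, st.2.1.insert r.2.2 p.1, r.2.1)) (tr, tm, nx)).1
        (items.foldl (fun st p =>
          let r := p.2.toList.foldl pvStep (st.1, st.2.2, 0)
          (r.1, st.2.1.insert r.2.2 p.1, r.2.1)) (tr, tm, nx)).2.1
        (items.foldl (fun st p =>
          let r := p.2.toList.foldl pvStep (st.1, st.2.2, 0)
          (r.1, st.2.1.insert r.2.2 p.1, r.2.1)) (tr, tm, nx)).2.2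
        (items.foldl (fun d p => d.insert p.2 p.1) iv) := by
  induction items with
  | nil => intro _ _ _ _ h; exact h
  | cons p rest ih =>
    intro tr tm nx iv hM
    simp only [List.foldl_cons]
    exact ih _ _ _ _ (pvBuild_step tr tm nx iv hM p.1 p.2)

-- A's loop, recast as recursion over the character list
def pvALoop (inv : PySem.Dict String String) : List Char → List Char → String
  | [], _ => ""
  | b :: rest, buf =>
    match inv.get? (String.ofList (buf ++ [b])) with
    | some ch => ch ++ pvALoop inv rest []
    | none => pvALoop inv rest (buf ++ [b])

theorem pvALoop_foldl (inv : PySem.Dict String String) (cs : List Char) :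
    ∀ (dec : String) (buf : List Char),
    (cs.foldl (fun (st : String × String) bit =>
      let code := st.2.push bit
      match inv.get? code with
      | some ch => (st.1 ++ ch, "")
      | none => (st.1, code)) (dec, String.ofList buf)).1 = dec ++ pvALoop inv cs buf := by
  induction cs with
  | nil => intro dec buf; simp [pvALoop]
  | cons b cs ih =>
    intro dec buf
    have hpush : (String.ofList buf).push b = String.ofList (buf ++ [b]) := by
      rw [← String.toList_inj]; simp
    simp only [List.foldl_cons, hpush, pvALoop]
    cases hg : inv.get? (String.ofList (buf ++ [b])) with
    | some ch =>
      have : ("" : String) = String.ofList [] := rfl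
      rw [this, ih (dec ++ ch) []]
      simp [String.append_assoc]
    | none => exact ih dec (buf ++ [b])

theorem pvDead (trans : PySem.Dict (Int × Char) Int) (term : PySem.Dict Int String)
    (nxt : Int) (inv : PySem.Dict String String) (hM : pvM trans term nxt inv)
    (rest : List Char) : ∀ (buf : List Char), buf ≠ [] →
    pvWalk trans 0 buf = none → pvALoop inv rest buf = "" := by
  induction rest with
  | nil => intro _ _ _; rfl
  | cons b rest ih =>
    intro buf hne hw
    have hw' : pvWalk trans 0 (buf ++ [b]) = none := by
      rw [pvWalk_append, hw]; rfl
    have := hM.2.2 (buf ++ [b]) (by simp)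
    rw [hw'] at this
    simp only [pvALoop, this]
    exact ih (buf ++ [b]) (by simp) hw'

theorem join_cons (s : String) (l : List String) : String.join (s :: l) = s ++ String.join l := by
  simp [String.join]
  induction l generalizing s with
  | nil => simp
  | cons t l ih => simp [List.foldl, ih (s ++ t), ih t, String.append_assoc]

theorem pvMain (trans : PySem.Dict (Int × Char) Int) (term : PySem.Dict Int String)
    (nxt : Int) (inv : PySem.Dict String String) (hM : pvM trans term nxt inv)
    (rest : List Char) : ∀ (buf : List Char) (cur : Int),
    pvWalk trans 0 buf = some cur →
    pvALoop inv rest buf = String.join (pvDec trans term rest cur) := by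
  induction rest with
  | nil => intro _ _ _; rfl
  | cons b rest ih =>
    intro buf cur hw
    cases hg : trans.get? (cur, b) with
    | none =>
      have hw' : pvWalk trans 0 (buf ++ [b]) = none := by
        rw [pvWalk_append, hw]; simp [pvWalk, hg]
      have hnone : inv.get? (String.ofList (buf ++ [b])) = none := by
        have h0 := hM.2.2 (buf ++ [b]) (by simp)
        rw [hw'] at h0; exact h0
      simp only [pvALoop, pvDec, hnone, hg]
      simpa [String.join] using pvDead trans term nxt inv hM rest (buf ++ [b]) (by simp) hw'
    | some n =>
      have hw' : pvWalk trans 0 (buf ++ [b]) = some n := by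
        rw [pvWalk_append, hw]; simp [pvWalk, hg]
      have hrel : term.get? n = inv.get? (String.ofList (buf ++ [b])) := by
        have h0 := hM.2.2 (buf ++ [b]) (by simp)
        rw [hw'] at h0; exact h0
      cases ht : term.get? n with
      | some ch =>
        rw [ht] at hrel
        simp only [pvALoop, pvDec, ← hrel, hg, ht, join_cons]
        rw [ih [] 0 (by simp [pvWalk])]
      | none =>
        rw [ht] at hrel
        simp only [pvALoop, pvDec, ← hrel, hg, ht]
        exact ih (buf ++ [b]) n hw'

-- ===== VERDICT (by name: the statement is the Claim_ definition above) =====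
theorem pvM_init : pvM PySem.Dict.empty PySem.Dict.empty 1 PySem.Dict.empty := by
  refine ⟨⟨le_refl 1, ?_, ?_⟩, ?_, ?_⟩
  · intro p b n h; simp [PySem.Dict.get?_empty] at h
  · intro p b p' b' n h _; simp [PySem.Dict.get?_empty] at h
  · intro n s h; simp [PySem.Dict.get?_empty] at h
  · intro s hs
    cases s with
    | nil => exact absurd rfl hs
    | cons b s => simp [pvWalk, PySem.Dict.get?_empty]

theorem tunstall_decode_spec : Claim_equal_tunstall_decode := by
  intro encoded codebook _
  unfold Spec_tunstall_decode tunstall_decode tunstall_decode_alt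
  have hM := pvBuild_fold (pvItems codebook) PySem.Dict.empty PySem.Dict.empty 1
    PySem.Dict.empty pvM_init
  have hA := pvALoop_foldl
    ((pvItems codebook).foldl (fun d p => d.insert p.2 p.1) PySem.Dict.empty)
    encoded.toList "" []
  have h0 : ("" : String) = String.ofList [] := rfl
  rw [h0] at hA ⊢
  rw [hA]
  have hmain := pvMain _ _ _ _ hM encoded.toList [] 0 (by simp [pvWalk])
  simp only [pvBuild]
  rw [← hmain]
  simp
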